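-- pv_equiv track=rewrite | github.com/tommyEzreal/study_2 | algorithm/programmers/0505.py | solution
-- ===== SOURCE A (Python) =====
-- def solution(a, b, n):
--     count = 0
--     while n>=a:
--         A = (n // a)*b
--         B = n % a
--         count += A
--         n = A+B
--
--     answer = count
--     return answer
-- ===== SOURCE B (Python) =====
-- def solution(a, b, n):
--     # Closed form: each exchange of a empties yields b fulls, so the total
--     # number of fulls gained is floor((n - b) / (a - b)) * b once any
--     # exchange is possible at all; no loop needed.
--     if n < a:
--         return 0
--     return ((n - b) // (a - b)) * b
-- ===== Notes on version B (the rewrite author's own statement) =====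
-- stated objective: simpler
-- what changed: Replaces the repeated-exchange simulation loop with a single closed-form floor-division formula floor((n-b)/(a-b))*b.
-- outside the precondition, e.g. on solution(3, -1, 10): A returns -3, B returns -2
import Mathlib
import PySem

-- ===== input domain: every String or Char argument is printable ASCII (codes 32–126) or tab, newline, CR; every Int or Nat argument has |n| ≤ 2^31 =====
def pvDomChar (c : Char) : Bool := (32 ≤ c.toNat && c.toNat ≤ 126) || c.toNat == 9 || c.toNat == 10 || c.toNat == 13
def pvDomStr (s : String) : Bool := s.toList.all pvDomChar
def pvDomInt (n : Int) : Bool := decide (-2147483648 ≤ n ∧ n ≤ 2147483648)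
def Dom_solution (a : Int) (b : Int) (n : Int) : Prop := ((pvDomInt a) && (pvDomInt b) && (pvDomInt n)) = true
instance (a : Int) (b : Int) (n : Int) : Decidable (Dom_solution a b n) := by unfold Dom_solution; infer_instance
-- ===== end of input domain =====

-- B replaces A's repeated-exchange simulation loop with a single closed-form floor-division formula (simpler: no loop).


-- ===== PORT A =====
-- A's while loop, with fuel; inside Pre_ the loop shrinks n by at least 1 each
-- round, so fuel (n - a).toNat + 1 is enough and the port is exact there.
def solutionLoop : Nat → Int → Int → Int → Int → Int
  | 0, _, _, _, count => count
  | fuel+1, a, b, n, count =>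
    if n ≥ a then
      let A := (PySem.Int.floordiv n a) * b
      let B := PySem.Int.mod n a
      solutionLoop fuel a b (A + B) (count + A)
    else count

def solution (a : Int) (b : Int) (n : Int) : Int :=
  solutionLoop ((n - a).toNat + 1) a b n 0

-- ===== PORT B =====
def solution_alt (a : Int) (b : Int) (n : Int) : Int :=
  if n < a then 0 else (PySem.Int.floordiv (n - b) (a - b)) * b

-- ===== PRECONDITION & SPEC =====
-- Pre_ restricts to the problem's natural domain: either no exchange is possible
-- (n < a, A returns 0 without dividing) or the exchange rate is sensible
-- (0 ≤ b < a); outside it A diverges (b ≥ a with n ≥ a), raises ZeroDivisionError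
-- (a = 0 with n ≥ 0), or simulates a meaningless negative exchange rate.
def Pre_solution (a : Int) (b : Int) (n : Int) : Prop := n < a ∨ (0 ≤ b ∧ b < a)
instance (a : Int) (b : Int) (n : Int) : Decidable (Pre_solution a b n) := by unfold Pre_solution; infer_instance
def pvWitness_solution : Int × Int × Int := (3, 1, 10)

def Spec_solution (a : Int) (b : Int) (n : Int) (out : Int) : Prop := out = solution_alt a b n
instance (a : Int) (b : Int) (n : Int) (out : Int) : Decidable (Spec_solution a b n out) := by unfold Spec_solution; infer_instance

-- ===== CLAIM (what is proved, stated in full; the proofs are below) =====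
def Claim_equal_solution : Prop := ∀ (a : Int) (b : Int) (n : Int), Dom_solution a b n → Pre_solution a b n → Spec_solution a b n (solution a b n)

-- ===== LEMMAS AND PROOFS =====

-- One exchange step folds into the closed form.
lemma step_eq (a b n : Int) (hb : 0 ≤ b) (hba : b < a) (hn : a ≤ n) :
    (PySem.Int.floordiv (n - b) (a - b)) * b
      = (PySem.Int.floordiv n a) * b
        + solution_alt a b ((PySem.Int.floordiv n a) * b + PySem.Int.mod n a) := by
  have ha : (0:Int) < a := lt_of_le_of_lt hb hba
  have hab : (0:Int) < a - b := by omega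
  set q := PySem.Int.floordiv n a with hq
  set r := PySem.Int.mod n a with hr
  have hnr : q * a + r = n := PySem.Int.floordiv_mul_add_mod n a
  have hr0 : 0 ≤ r := by
    rw [hr, PySem.Int.mod_eq_emod_of_pos ha]; exact Int.emod_nonneg n (by omega)
  have hq1 : 1 ≤ q := by
    rw [hq, PySem.Int.le_floordiv_iff_mul_le ha]; omega
  have hqb : b ≤ q * b := le_mul_of_one_le_left hb hq1
  -- shift identity: n - b = (q*b + r - b) + q * (a - b)
  have hshift : PySem.Int.floordiv (n - b) (a - b)
      = PySem.Int.floordiv (q * b + r - b) (a - b) + q := by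
    rw [PySem.Int.floordiv_eq_ediv_of_pos hab, PySem.Int.floordiv_eq_ediv_of_pos hab]
    have : n - b = (q * b + r - b) + q * (a - b) := by ring_nf; omega
    rw [this, Int.add_mul_ediv_right _ _ (by omega : a - b ≠ 0)]
  by_cases h2 : q * b + r < a
  · have hz : PySem.Int.floordiv (q * b + r - b) (a - b) = 0 := by
      rw [PySem.Int.floordiv_eq_ediv_of_pos hab]
      exact Int.ediv_eq_zero_of_lt (by omega) (by omega)
    simp [solution_alt, h2, hshift, hz]
  · simp only [solution_alt, if_neg h2]
    rw [hshift]; ring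
-- Loop invariant: with enough fuel the loop computes count + closed form.
lemma loop_eq (b a : Int) (hb : 0 ≤ b) (hba : b < a) :
    ∀ (fuel : Nat) (n count : Int), n < a + fuel →
      solutionLoop fuel a b n count = count + solution_alt a b n := by
  intro fuel
  induction fuel with
  | zero =>
    intro n count hlt
    have : n < a := by push_cast at hlt; omega
    simp [solutionLoop, solution_alt, this]
  | succ f ih =>
    intro n count hlt
    by_cases h : a ≤ n
    · have ha : (0:Int) < a := lt_of_le_of_lt hb hba
      simp only [solutionLoop, if_pos h]
      set q := PySem.Int.floordiv n a with hq
      set r := PySem.Int.mod n a with hr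
      have hnr : q * a + r = n := PySem.Int.floordiv_mul_add_mod n a
      have hr0 : 0 ≤ r := by
        rw [hr, PySem.Int.mod_eq_emod_of_pos ha]; exact Int.emod_nonneg n (by omega)
      have hq1 : 1 ≤ q := by
        rw [hq, PySem.Int.le_floordiv_iff_mul_le ha]; omega
      have hdec : q * b + r ≤ n - (a - b) := by
        have h1 : (b - a) * q ≤ (b - a) * 1 :=
          mul_le_mul_of_nonpos_left hq1 (by omega)
        nlinarith
      have hfuel : q * b + r < a + f := by
        push_cast at hlt ⊢; omega
      rw [ih (q * b + r) (count + q * b) hfuel]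
      have hs := step_eq a b n hb hba h
      have hA : solution_alt a b n = PySem.Int.floordiv (n - b) (a - b) * b := by
        simp only [solution_alt, if_neg (by omega : ¬ n < a)]
      rw [hA, hs, hq, hr]; ring
    · simp [solutionLoop, if_neg h, solution_alt, show n < a by omega]

-- ===== VERDICT (by name: the statement is the Claim_ definition above) =====
theorem solution_spec : Claim_equal_solution := by
  intro a b n _ hpre
  unfold Spec_solution solution
  rcases hpre with hlt | ⟨hb, hba⟩
  · have h1 : ¬ n ≥ a := by omega
    simp [solutionLoop, h1, solution_alt, hlt]
  · have hf : n < a + ((n - a).toNat + 1 : Nat) := by push_cast; omega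
    rw [loop_eq b a hb hba _ n 0 hf]; ring
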